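-- pv_equiv track=rewrite | github.com/ElifCntr/DroneDetection_2D_3D | src/utils/data_processing/ground_truth_loader.py | get_video_frame_ranges
-- ===== SOURCE A (Python) =====
-- from typing import Dict, List, Optional, Set, Tuple
--
-- def get_video_frame_ranges(frame_gt: Dict[str, Dict[int, int]]) -> Dict[str, Tuple[int, int]]:
--     """Get frame number ranges for each video."""
--
--     frame_ranges = {}
--
--     for video_name, video_annotations in frame_gt.items():
--         if video_annotations:
--             min_frame = min(video_annotations.keys())
--             max_frame = max(video_annotations.keys())
--             frame_ranges[video_name] = (min_frame, max_frame)
--         else: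
--             frame_ranges[video_name] = (0, 0)
--
--     return frame_ranges
-- ===== SOURCE B (Python) =====
-- def get_video_frame_ranges(frame_gt):
--     """Get frame number ranges for each video (single min/max fold per video)."""
--     frame_ranges = {}
--     for video_name, video_annotations in frame_gt.items():
--         it = iter(video_annotations)
--         try:
--             lo = hi = next(it)
--         except StopIteration:
--             frame_ranges[video_name] = (0, 0)
--             continue
--         for k in it:
--             if k < lo:
--                 lo = k
--             elif hi < k:
--                 hi = k
--         frame_ranges[video_name] = (lo, hi)
--     return frame_ranges
-- ===== Notes on version B (the rewrite author's own statement) =====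
-- stated objective: alternative
-- what changed: Replaces the two separate min()/max() scans over each video's keys with a single combined fold maintaining running lo/hi, handling the empty case via iterator exhaustion instead of a truthiness branch.
import Mathlib
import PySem

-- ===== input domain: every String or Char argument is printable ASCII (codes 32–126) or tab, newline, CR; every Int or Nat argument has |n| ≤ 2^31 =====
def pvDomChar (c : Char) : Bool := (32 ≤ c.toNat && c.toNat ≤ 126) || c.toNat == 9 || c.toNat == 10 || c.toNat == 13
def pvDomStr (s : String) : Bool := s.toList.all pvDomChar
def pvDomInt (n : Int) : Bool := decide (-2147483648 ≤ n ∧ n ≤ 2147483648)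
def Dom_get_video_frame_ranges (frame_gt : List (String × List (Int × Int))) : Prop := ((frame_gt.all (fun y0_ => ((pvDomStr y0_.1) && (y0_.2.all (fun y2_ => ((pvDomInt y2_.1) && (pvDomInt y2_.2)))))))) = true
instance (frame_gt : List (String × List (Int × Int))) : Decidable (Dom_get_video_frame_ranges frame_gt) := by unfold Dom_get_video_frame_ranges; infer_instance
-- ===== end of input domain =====

-- B replaces A's two separate min()/max() scans per video by one combined fold keeping a running (lo, hi); objective: alternative decomposition, same cost.

-- ===== PORT A =====
-- Python A: for each video, if annotations nonempty take min(keys) and max(keys) (two scans), else (0,0); results stored in a dict.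
def get_video_frame_ranges (frame_gt : List (String × List (Int × Int))) : List (String × Int × Int) :=
  (frame_gt.foldl (fun frame_ranges p =>
      if p.2 ≠ [] then
        let ks := p.2.map Prod.fst
        let min_frame := (PySem.List.min? ks (fun x => x)).getD 0   -- getD unreachable: ks ≠ []
        let max_frame := (PySem.List.max? ks (fun x => x)).getD 0
        frame_ranges.insert p.1 (min_frame, max_frame)
      else
        frame_ranges.insert p.1 ((0 : Int), (0 : Int)))
    PySem.Dict.empty).items

-- ===== PORT B =====
-- B helper: one pass over the keys, running lo/hi (the elif of Source B).
def pvRangeOf (ann : List (Int × Int)) : Int × Int :=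
  match ann with
  | [] => (0, 0)
  | k0 :: t =>
    t.foldl (fun a p =>
        if p.1 < a.1 then (p.1, a.2)
        else if a.2 < p.1 then (a.1, p.1)
        else a)
      (k0.1, k0.1)

def get_video_frame_ranges_alt (frame_gt : List (String × List (Int × Int))) : List (String × Int × Int) :=
  (frame_gt.foldl (fun frame_ranges p => frame_ranges.insert p.1 (pvRangeOf p.2)) PySem.Dict.empty).items

-- ===== PRECONDITION & SPEC =====
def Spec_get_video_frame_ranges (frame_gt : List (String × List (Int × Int))) (out : List (String × Int × Int)) : Prop := out = get_video_frame_ranges_alt frame_gt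
instance (frame_gt : List (String × List (Int × Int))) (out : List (String × Int × Int)) : Decidable (Spec_get_video_frame_ranges frame_gt out) := by unfold Spec_get_video_frame_ranges; infer_instance

-- ===== CLAIM (what is proved, stated in full; the proofs are below) =====
def Claim_equal_get_video_frame_ranges : Prop := ∀ (frame_gt : List (String × List (Int × Int))), Dom_get_video_frame_ranges frame_gt → Spec_get_video_frame_ranges frame_gt (get_video_frame_ranges frame_gt)

-- ===== LEMMAS AND PROOFS =====

-- B's combined lo/hi fold computes the running min and running max, given lo ≤ hi.
lemma pv_fold2_eq (t : List (Int × Int)) (lo hi : Int) (h : lo ≤ hi) :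
    t.foldl (fun a p =>
        if p.1 < a.1 then (p.1, a.2)
        else if a.2 < p.1 then (a.1, p.1)
        else a)
      (lo, hi)
      = ((t.map Prod.fst).foldl min lo, (t.map Prod.fst).foldl max hi) := by
  induction t generalizing lo hi with
  | nil => simp
  | cons k t ih =>
    simp only [List.foldl_cons, List.map_cons]
    have hstep : (if k.1 < lo then ((k.1 : Int), hi)
        else if hi < k.1 then (lo, k.1) else (lo, hi)) = (min lo k.1, max hi k.1) := by
      split_ifs <;> simp [min_def, max_def] <;> omega
    rw [hstep, ih _ _ (by have := le_max_right hi k.1; have := min_le_left lo k.1; omega)]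

-- Per-video: A's (min, max) pair equals B's single-pass pair.
lemma pv_entry_eq (ann : List (Int × Int)) :
    (if ann ≠ [] then
        (((PySem.List.min? (ann.map Prod.fst) (fun x => x)).getD 0),
         ((PySem.List.max? (ann.map Prod.fst) (fun x => x)).getD 0))
      else ((0 : Int), (0 : Int))) = pvRangeOf ann := by
  match ann with
  | [] => simp [pvRangeOf]
  | k0 :: t =>
    simp only [ne_eq, reduceCtorEq, not_false_eq_true, if_true, List.map_cons, pvRangeOf]
    rw [PySem.List.min?_id_cons, PySem.List.max?_id_cons,
        pv_fold2_eq t k0.1 k0.1 (le_refl _)]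
    simp

lemma pv_fold_eq (frame_gt : List (String × List (Int × Int)))
    (acc : PySem.Dict String (Int × Int)) :
    frame_gt.foldl (fun frame_ranges p =>
        if p.2 ≠ [] then
          frame_ranges.insert p.1
            (((PySem.List.min? (p.2.map Prod.fst) (fun x => x)).getD 0),
             ((PySem.List.max? (p.2.map Prod.fst) (fun x => x)).getD 0))
        else frame_ranges.insert p.1 ((0 : Int), (0 : Int))) acc
      = frame_gt.foldl (fun frame_ranges p => frame_ranges.insert p.1 (pvRangeOf p.2)) acc := by
  induction frame_gt generalizing acc with
  | nil => rfl
  | cons p t ih =>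
    simp only [List.foldl_cons]
    rw [show (if p.2 ≠ [] then
          acc.insert p.1
            (((PySem.List.min? (p.2.map Prod.fst) (fun x => x)).getD 0),
             ((PySem.List.max? (p.2.map Prod.fst) (fun x => x)).getD 0))
        else acc.insert p.1 ((0 : Int), (0 : Int))) = acc.insert p.1 (pvRangeOf p.2) from by
      rw [← pv_entry_eq p.2]; split_ifs <;> rfl]
    exact ih _

-- ===== VERDICT (by name: the statement is the Claim_ definition above) =====
theorem get_video_frame_ranges_spec : Claim_equal_get_video_frame_ranges := by
  intro frame_gt _
  unfold Spec_get_video_frame_ranges get_video_frame_ranges get_video_frame_ranges_alt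
  rw [pv_fold_eq]
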